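-- pv_equiv track=rewrite | github.com/jamie-large/Advent-of-Code-2018 | day8.py | recursive_solver
-- ===== SOURCE A (Python) =====
-- def recursive_solver(numbers: list[int], i: int = 0):
--     num_child_nodes = numbers[i]
--     num_metadata = numbers[i+1]
--     i += 2
--
--     children: list[int] = []
--     for _ in range(num_child_nodes):
--         c, i = recursive_solver(numbers, i)
--         children.append(c)
--
--     result = 0
--     for _ in range(num_metadata):
--         if num_child_nodes == 0:
--             result += numbers[i]
--         elif numbers[i] > 0 and numbers[i] <= len(children):
--             result += children[numbers[i] - 1]
--         i += 1
--
--     return result, i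
-- ===== SOURCE B (Python) =====
-- def recursive_solver(numbers: list[int], i: int = 0):
--     # Iterative re-implementation: explicit stack of frames instead of recursion.
--     # Each frame = [children_still_needed, metadata_count, collected_child_values].
--     stack = []
--     while True:
--         # read the header of the next node and open a frame for it
--         nc = numbers[i]
--         nm = numbers[i + 1]
--         i += 2
--         stack.append([nc, nm, []])
--         # close every frame that needs no further children
--         while stack[-1][0] <= 0:
--             nc2, nm2, children = stack.pop()
--             value = 0
--             for _ in range(nm2):
--                 m = numbers[i]
--                 if nc2 == 0 and not children:   # a true leaf: no children were ever expected
--                     value += m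
--                 elif 0 < m <= len(children):
--                     value += children[m - 1]
--                 i += 1
--             if not stack:
--                 return value, i
--             stack[-1][2].append(value)
--             stack[-1][0] -= 1
-- ===== Notes on version B (the rewrite author's own statement) =====
-- stated objective: alternative
-- what changed: A's recursive descent is replaced by an iterative stack machine: one loop reads node headers and pushes frames (children still needed, metadata count, collected child values), an inner loop closes finished frames and feeds their value to the parent.
import Mathlib
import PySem

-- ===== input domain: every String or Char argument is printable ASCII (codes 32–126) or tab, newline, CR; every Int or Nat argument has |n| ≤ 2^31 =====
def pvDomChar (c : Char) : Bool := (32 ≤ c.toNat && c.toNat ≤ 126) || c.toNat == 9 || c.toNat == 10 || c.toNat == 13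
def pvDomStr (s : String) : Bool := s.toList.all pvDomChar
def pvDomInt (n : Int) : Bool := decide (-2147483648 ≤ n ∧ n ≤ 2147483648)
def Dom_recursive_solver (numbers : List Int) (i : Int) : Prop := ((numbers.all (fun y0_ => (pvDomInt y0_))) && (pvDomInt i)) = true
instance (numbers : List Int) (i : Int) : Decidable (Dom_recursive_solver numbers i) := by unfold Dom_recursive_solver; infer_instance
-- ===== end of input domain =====

-- B replaces A's recursive descent by an iterative stack machine (explicit frames instead of
-- call-stack recursion); equivalence of the two ports is proved on Pre_ (inputs where A returns).

-- ===== PORT A =====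
-- A's metadata loop: 'for _ in range(num_metadata): …' (result, i) accumulator; the read
-- children[numbers[i]-1] is guarded by its branch condition, so the bind below never fails there.
def pvMetaA (ns : List Int) (nc : Int) (children : List Int) : Nat → Int → Int → Option (Int × Int)
  | 0, i, res => some (res, i)
  | k + 1, i, res =>
    match PySem.List.pyGet? ns i with
    | none => none
    | some m =>
      if nc = 0 then pvMetaA ns nc children k (i + 1) (res + m)
      else if 0 < m ∧ m ≤ (children.length : Int) then
        match PySem.List.pyGet? children (m - 1) with
        | none => none
        | some c => pvMetaA ns nc children k (i + 1) (res + c)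
      else pvMetaA ns nc children k (i + 1) res

-- A's recursion, made total by a fuel argument (2*len+2 always suffices on Pre_, proved below);
-- none = the Python raises (IndexError).
mutual
def pvParseNode (ns : List Int) (f : Nat) (i : Int) : Option (Int × Int) :=
  match f with
  | 0 => none
  | f' + 1 =>
    match PySem.List.pyGet? ns i with
    | none => none
    | some nc =>
      match PySem.List.pyGet? ns (i + 1) with
      | none => none
      | some nm =>
        match pvParseChildren ns f' nc.toNat (i + 2) [] with
        | none => none
        | some (children, i2) => pvMetaA ns nc children nm.toNat i2 0
termination_by (f, 0, 0)

def pvParseChildren (ns : List Int) (f : Nat) (k : Nat) (i : Int) (acc : List Int) : Option (List Int × Int) :=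
  match k with
  | 0 => some (acc, i)
  | k' + 1 =>
    match f with
    | 0 => none
    | f' + 1 =>
      match pvParseNode ns (f' + 1) i with
      | none => none
      | some (c, i') => pvParseChildren ns f' k' i' (acc ++ [c])
termination_by (f, k, 1)
end

def recursive_solver (numbers : List Int) (i : Int) : Int × Int :=
  (pvParseNode numbers (2 * numbers.length + 2) i).getD (0, 0)

-- ===== PORT B =====
-- B's metadata loop; the frame's counter nc2 has been decremented to 0 for an inner node,
-- so B tests 'nc2 == 0 and not children' for the leaf branch.
def pvMetaB (ns : List Int) (nc2 : Int) (children : List Int) : Nat → Int → Int → Option (Int × Int)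
  | 0, i, res => some (res, i)
  | k + 1, i, res =>
    match PySem.List.pyGet? ns i with
    | none => none
    | some m =>
      if nc2 = 0 ∧ children = [] then pvMetaB ns nc2 children k (i + 1) (res + m)
      else if 0 < m ∧ m ≤ (children.length : Int) then
        match PySem.List.pyGet? children (m - 1) with
        | none => none
        | some c => pvMetaB ns nc2 children k (i + 1) (res + c)
      else pvMetaB ns nc2 children k (i + 1) res

-- B's outer 'while True' (pvMachine: read a header, push a frame) and inner while
-- (pvResolve: close every frame needing no more children), fuelled like A's port.
-- A frame is (children still needed, metadata count, collected child values).
mutual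
def pvMachine (ns : List Int) (fl : Nat) (i : Int) (stack : List (Int × Int × List Int)) : Option (Int × Int) :=
  match fl with
  | 0 => none
  | fl' + 1 =>
    match PySem.List.pyGet? ns i with
    | none => none
    | some nc =>
      match PySem.List.pyGet? ns (i + 1) with
      | none => none
      | some nm => pvResolve ns fl' (i + 2) ((nc, nm, []) :: stack)
termination_by (fl, 0, 0)

def pvResolve (ns : List Int) (fl : Nat) (i : Int) (stack : List (Int × Int × List Int)) : Option (Int × Int) :=
  match stack with
  | [] => none   -- unreachable: pvResolve is only ever called with a nonempty stack
  | (nc, nm, ch) :: rest =>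
    if nc ≤ 0 then
      match pvMetaB ns nc ch nm.toNat i 0 with
      | none => none
      | some (v, i') =>
        match rest with
        | [] => some (v, i')
        | (pnc, pnm, pch) :: rrest => pvResolve ns fl i' ((pnc - 1, pnm, pch ++ [v]) :: rrest)
    else pvMachine ns fl i stack
termination_by (fl, stack.length, 1)
end

def recursive_solver_alt (numbers : List Int) (i : Int) : Int × Int :=
  (pvMachine numbers (2 * numbers.length + 2) i []).getD (0, 0)

-- ===== PRECONDITION & SPEC =====
-- The domain of a tree parser: numbers[i:] starts a complete header-encoded tree with every
-- read in range — exactly the inputs on which the Python A returns (elsewhere it raises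
-- IndexError). The condition is the tree GRAMMAR itself, hence recursive; the checker below
-- states only the shape (header reads, child count, metadata bounds) plus the end index and
-- node count, and computes no values. pvWfGo ns f k i checks k consecutive trees from i.
def pvMetaEnd (ns : List Int) (nm i2 : Int) : Option Int :=
  if nm ≤ 0 then some i2
  else if -(ns.length : Int) ≤ i2 ∧ i2 + nm ≤ (ns.length : Int) then some (i2 + nm) else none

def pvWfGo (ns : List Int) (f : Nat) (k : Nat) (i : Int) : Option (Int × Nat) :=
  match k with
  | 0 => some (i, 0)
  | k' + 1 =>
    match f with
    | 0 => none
    | f' + 1 =>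
      match PySem.List.pyGet? ns i with
      | none => none
      | some nc =>
        match PySem.List.pyGet? ns (i + 1) with
        | none => none
        | some nm =>
          match pvWfGo ns f' nc.toNat (i + 2) with
          | none => none
          | some (i2, mc) =>
            match pvMetaEnd ns nm i2 with
            | none => none
            | some e =>
              match pvWfGo ns f' k' e with
              | none => none
              | some (j, ms) => some (j, mc + 1 + ms)

def Pre_recursive_solver (numbers : List Int) (i : Int) : Prop :=
  (pvWfGo numbers (2 * numbers.length + 2) 1 i).isSome = true

instance (numbers : List Int) (i : Int) : Decidable (Pre_recursive_solver numbers i) := by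
  unfold Pre_recursive_solver; infer_instance

def pvWitness_recursive_solver : List Int × Int := ([2, 3, 0, 3, 10, 11, 12, 1, 1, 0, 1, 99, 2, 1, 1, 2], 0)

def Spec_recursive_solver (numbers : List Int) (i : Int) (out : Int × Int) : Prop := out = recursive_solver_alt numbers i
instance (numbers : List Int) (i : Int) (out : Int × Int) : Decidable (Spec_recursive_solver numbers i out) := by unfold Spec_recursive_solver; infer_instance

-- ===== CLAIM (what is proved, stated in full; the proofs are below) =====
def Claim_equal_recursive_solver : Prop := ∀ (numbers : List Int) (i : Int), Dom_recursive_solver numbers i → Pre_recursive_solver numbers i → Spec_recursive_solver numbers i (recursive_solver numbers i)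

-- ===== LEMMAS AND PROOFS =====

theorem bounds_of_pyGet?_some {α : Type} (xs : List α) (i : Int) (x : α) (h : PySem.List.pyGet? xs i = some x) :
    -(xs.length : Int) ≤ i ∧ i < xs.length := by
  by_contra hc
  have hn : PySem.List.pyGet? xs i = none := by
    rw [PySem.List.pyGet?_eq_none_iff]
    simp [PySem.Raise.InRange]
    omega
  simp [hn] at h

theorem pyGet?_isSome_of_bounds {α : Type} (xs : List α) (i : Int) (h1 : -(xs.length : Int) ≤ i) (h2 : i < xs.length) :
    ∃ x, PySem.List.pyGet? xs i = some x := by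
  cases h : PySem.List.pyGet? xs i with
  | some x => exact ⟨x, rfl⟩
  | none =>
    rw [PySem.List.pyGet?_eq_none_iff] at h
    exfalso; apply h
    simp [PySem.Raise.InRange]
    omega

-- The two metadata loops agree whenever the leaf tests agree.
theorem pvMetaA_eq_pvMetaB (ns : List Int) (nc nc2 : Int) (ch : List Int)
    (h : nc = 0 ↔ (nc2 = 0 ∧ ch = [])) :
    ∀ (k : Nat) (i res : Int), pvMetaA ns nc ch k i res = pvMetaB ns nc2 ch k i res := by
  intro k
  induction k with
  | zero => intro i res; simp [pvMetaA, pvMetaB]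
  | succ k ih =>
    intro i res
    simp only [pvMetaA, pvMetaB]
    cases hr : PySem.List.pyGet? ns i with
    | none => rfl
    | some m =>
      dsimp only
      by_cases h0 : nc = 0
      · rw [if_pos h0, if_pos (h.mp h0), ih]
      · rw [if_neg h0, if_neg (fun hc => h0 (h.mpr hc))]
        by_cases hm : 0 < m ∧ m ≤ (ch.length : Int)
        · rw [if_pos hm, if_pos hm]
          cases hg : PySem.List.pyGet? ch (m - 1) with
          | none => rfl
          | some c => dsimp only; rw [ih]
        · rw [if_neg hm, if_neg hm, ih]

-- The metadata loop succeeds and advances i by exactly k when all k reads are in range.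
theorem pvMetaA_total (ns : List Int) (nc : Int) (ch : List Int) :
    ∀ (k : Nat) (i res : Int), -(ns.length : Int) ≤ i → i + k ≤ (ns.length : Int) →
      ∃ v, pvMetaA ns nc ch k i res = some (v, i + k) := by
  intro k
  induction k with
  | zero => intro i res _ _; exact ⟨res, by simp [pvMetaA]⟩
  | succ k ih =>
    intro i res h1 h2
    obtain ⟨m, hm⟩ := pyGet?_isSome_of_bounds ns i h1 (by push_cast at h2 ⊢; omega)
    have h1' : -(ns.length : Int) ≤ i + 1 := by omega
    have h2' : i + 1 + (k : Int) ≤ (ns.length : Int) := by push_cast at h2 ⊢; omega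
    have hcast : ((k + 1 : Nat) : Int) = (k : Int) + 1 := by push_cast; ring
    have hidx : i + ((k : Int) + 1) = i + 1 + (k : Int) := by ring
    simp only [pvMetaA, hm]
    by_cases h0 : nc = 0
    · rw [if_pos h0]
      obtain ⟨v, hv⟩ := ih (i + 1) (res + m) h1' h2'
      exact ⟨v, by rw [hcast, hidx, hv]⟩
    · rw [if_neg h0]
      by_cases hmm : 0 < m ∧ m ≤ (ch.length : Int)
      · rw [if_pos hmm]
        obtain ⟨hm1, hm2⟩ := hmm
        obtain ⟨c, hc⟩ := pyGet?_isSome_of_bounds ch (m - 1) (by omega) (by omega)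
        rw [hc]
        dsimp only
        obtain ⟨v, hv⟩ := ih (i + 1) (res + c) h1' h2'
        exact ⟨v, by rw [hcast, hidx, hv]⟩
      · rw [if_neg hmm]
        obtain ⟨v, hv⟩ := ih (i + 1) res h1' h2'
        exact ⟨v, by rw [hcast, hidx, hv]⟩

-- parseChildren grows the accumulator by exactly k values.
theorem pvParseChildren_length (ns : List Int) : ∀ (f : Nat) (k : Nat) (i : Int) (acc cs : List Int) (j : Int),
      pvParseChildren ns f k i acc = some (cs, j) → cs.length = acc.length + k := by
  intro f
  induction f with
  | zero =>
    intro k i acc cs j h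
    cases k with
    | zero =>
      have h' : acc = cs := by
        simp only [pvParseChildren, Option.some.injEq, Prod.mk.injEq] at h
        exact h.1
      simp [← h']
    | succ k => simp [pvParseChildren] at h
  | succ f ih =>
    intro k i acc cs j h
    cases k with
    | zero =>
      have h' : acc = cs := by
        simp only [pvParseChildren, Option.some.injEq, Prod.mk.injEq] at h
        exact h.1
      simp [← h']
    | succ k =>
      simp only [pvParseChildren] at h
      cases hn : pvParseNode ns (f + 1) i with
      | none => rw [hn] at h; exact absurd h (by simp)
      | some ci =>
        obtain ⟨c, i'⟩ := ci
        rw [hn] at h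
        have := ih k i' (acc ++ [c]) cs j h
        simp at this
        omega

-- The shape checker accepts exactly when A's parser (same fuel schedule) returns, with the
-- same end index.
theorem pvWf_parse (ns : List Int) : ∀ f k i j n (acc : List Int),
    pvWfGo ns f k i = some (j, n) → ∃ vs, pvParseChildren ns f k i acc = some (acc ++ vs, j) := by
  intro f
  induction f with
  | zero =>
    intro k i j n acc h
    cases k with
    | zero =>
      have h' : i = j := by
        simp only [pvWfGo, Option.some.injEq, Prod.mk.injEq] at h
        exact h.1
      exact ⟨[], by simp [pvParseChildren, h']⟩
    | succ k => simp [pvWfGo] at h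
  | succ f ih =>
    intro k i j n acc h
    cases k with
    | zero =>
      simp only [pvWfGo, Option.some.injEq, Prod.mk.injEq] at h
      exact ⟨[], by simp [pvParseChildren, h.1]⟩
    | succ k' =>
      cases hr1 : PySem.List.pyGet? ns i with
      | none => simp [pvWfGo, hr1] at h
      | some nc =>
      cases hr2 : PySem.List.pyGet? ns (i + 1) with
      | none => simp [pvWfGo, hr1, hr2] at h
      | some nm =>
      cases hwc : pvWfGo ns f nc.toNat (i + 2) with
      | none => simp [pvWfGo, hr1, hr2, hwc] at h
      | some im =>
      obtain ⟨i2, mc⟩ := im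
      cases hme : pvMetaEnd ns nm i2 with
      | none => simp [pvWfGo, hr1, hr2, hwc, hme] at h
      | some e =>
      cases hsib : pvWfGo ns f k' e with
      | none => simp [pvWfGo, hr1, hr2, hwc, hme, hsib] at h
      | some q =>
      obtain ⟨j', ms⟩ := q
      simp only [pvWfGo, hr1, hr2, hwc, hme, hsib, Option.some.injEq, Prod.mk.injEq] at h
      obtain ⟨vs1, hpc⟩ := ih nc.toNat (i + 2) i2 mc [] hwc
      rw [List.nil_append] at hpc
      -- the node's metadata loop succeeds and ends at e
      have hmeta : ∃ v, pvMetaA ns nc vs1 nm.toNat i2 0 = some (v, e) := by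
        unfold pvMetaEnd at hme
        by_cases hnm : nm ≤ 0
        · rw [if_pos hnm] at hme
          have hnm0 : nm.toNat = 0 := by omega
          refine ⟨0, ?_⟩
          rw [hnm0, show i2 = e from by injection hme]
          rfl
        · rw [if_neg hnm] at hme
          by_cases hg : -(ns.length : Int) ≤ i2 ∧ i2 + nm ≤ (ns.length : Int)
          · rw [if_pos hg] at hme
            have hnmt : ((nm.toNat : Nat) : Int) = nm := by omega
            obtain ⟨v, hv⟩ := pvMetaA_total ns nc vs1 nm.toNat i2 0 hg.1 (by rw [hnmt]; exact hg.2)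
            exact ⟨v, by rw [hv, hnmt, show i2 + nm = e from by injection hme]⟩
          · rw [if_neg hg] at hme; exact absurd hme (by simp)
      obtain ⟨v, hv⟩ := hmeta
      have hnodep : pvParseNode ns (f + 1) i = some (v, e) := by
        simp only [pvParseNode, hr1, hr2, hpc, hv]
      obtain ⟨vs2, hsp⟩ := ih k' e j' ms (acc ++ [v]) hsib
      refine ⟨v :: vs2, ?_⟩
      simp only [pvParseChildren, hnodep]
      have hsp' : pvParseChildren ns f k' e (acc ++ [v]) = some (acc ++ (v :: vs2), j') := by
        rw [hsp]; simp
      rw [hsp', h.1]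

-- Node-level corollary of pvWf_parse.
theorem pvWf_parse_node (ns : List Int) (f : Nat) (i j : Int) (n : Nat)
    (h : pvWfGo ns (f + 1) 1 i = some (j, n)) : ∃ v, pvParseNode ns (f + 1) i = some (v, j) := by
  obtain ⟨vs, hpc⟩ := pvWf_parse ns (f + 1) 1 i j n [] h
  rw [List.nil_append] at hpc
  simp only [pvParseChildren] at hpc
  cases hn : pvParseNode ns (f + 1) i with
  | none => rw [hn] at hpc; exact absurd hpc (by simp)
  | some p =>
    obtain ⟨c, i'⟩ := p
    rw [hn] at hpc
    simp only [Option.some.injEq, Prod.mk.injEq] at hpc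
    refine ⟨c, ?_⟩
    rw [hpc.2]

-- Size bounds extracted from the shape checker: each node consumes at least two list cells,
-- every index stays in [-len, len].
theorem pvWf_bounds (ns : List Int) : ∀ f k i j n,
    pvWfGo ns f k i = some (j, n) →
      i + 2 * (n : Int) ≤ j ∧ (0 < k → j ≤ (ns.length : Int) ∧ -(ns.length : Int) ≤ i) := by
  intro f
  induction f with
  | zero =>
    intro k i j n h
    cases k with
    | zero =>
      simp only [pvWfGo, Option.some.injEq, Prod.mk.injEq] at h
      exact ⟨by omega, by omega⟩
    | succ k => simp [pvWfGo] at h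
  | succ f ih =>
    intro k i j n h
    cases k with
    | zero =>
      simp only [pvWfGo, Option.some.injEq, Prod.mk.injEq] at h
      exact ⟨by omega, by omega⟩
    | succ k' =>
      cases hr1 : PySem.List.pyGet? ns i with
      | none => simp [pvWfGo, hr1] at h
      | some nc =>
      cases hr2 : PySem.List.pyGet? ns (i + 1) with
      | none => simp [pvWfGo, hr1, hr2] at h
      | some nm =>
      cases hwc : pvWfGo ns f nc.toNat (i + 2) with
      | none => simp [pvWfGo, hr1, hr2, hwc] at h
      | some im =>
      obtain ⟨i2, mc⟩ := im
      cases hme : pvMetaEnd ns nm i2 with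
      | none => simp [pvWfGo, hr1, hr2, hwc, hme] at h
      | some e =>
      cases hsib : pvWfGo ns f k' e with
      | none => simp [pvWfGo, hr1, hr2, hwc, hme, hsib] at h
      | some q =>
      obtain ⟨j', ms⟩ := q
      simp only [pvWfGo, hr1, hr2, hwc, hme, hsib, Option.some.injEq, Prod.mk.injEq] at h
      obtain ⟨hb1, hb1'⟩ := bounds_of_pyGet?_some ns i nc hr1
      obtain ⟨hb2, hb2'⟩ := bounds_of_pyGet?_some ns (i + 1) nm hr2
      obtain ⟨hc1, hc2⟩ := ih nc.toNat (i + 2) i2 mc hwc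
      have hi2 : i2 ≤ (ns.length : Int) := by
        cases Nat.eq_zero_or_pos nc.toNat with
        | inl h0 =>
          rw [h0] at hwc
          simp only [pvWfGo, Option.some.injEq, Prod.mk.injEq] at hwc
          omega
        | inr h0 => exact (hc2 h0).1
      have he : i2 ≤ e ∧ e ≤ (ns.length : Int) := by
        unfold pvMetaEnd at hme
        split_ifs at hme <;> simp only [Option.some.injEq] at hme <;> omega
      obtain ⟨hs1, hs2⟩ := ih k' e j' ms hsib
      have hjl : j' ≤ (ns.length : Int) := by
        cases Nat.eq_zero_or_pos k' with
        | inl h0 =>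
          rw [h0] at hsib
          simp only [pvWfGo, Option.some.injEq, Prod.mk.injEq] at hsib
          omega
        | inr h0 => exact (hs2 h0).1
      refine ⟨by omega, fun _ => ⟨by omega, by omega⟩⟩

-- 'hand the finished value v (ending at j) to the stack s': what B's inner while does next.
def pvGive (ns : List Int) (fl : Nat) (v j : Int) (s : List (Int × Int × List Int)) : Option (Int × Int) :=
  match s with
  | [] => some (v, j)
  | (pnc, pnm, pch) :: r => pvResolve ns fl j ((pnc - 1, pnm, pch ++ [v]) :: r)

-- one step of B's inner while: a frame with no children left closes into pvGive.
theorem pvResolve_close (ns : List Int) (fl : Nat) (nc nm i v j : Int) (ch : List Int)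
    (s : List (Int × Int × List Int)) (hnc : nc ≤ 0)
    (hmeta : pvMetaB ns nc ch nm.toNat i 0 = some (v, j)) :
    pvResolve ns fl i ((nc, nm, ch) :: s) = pvGive ns fl v j s := by
  rw [pvResolve.eq_2, if_pos hnc, hmeta]
  cases s with
  | nil => rfl
  | cons fr r => rfl

-- Simulation: the machine run on a subtree of n nodes uses exactly n units of fuel and then
-- hands the subtree's value to the surrounding stack; for a row of k pending sibling subtrees
-- the parent frame collects their values one by one.
theorem pvSim (ns : List Int) : ∀ f : Nat,
    (∀ i v j n, pvWfGo ns f 1 i = some (j, n) → pvParseNode ns f i = some (v, j) →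
      ∀ (fl : Nat) (s : List (Int × Int × List Int)), pvMachine ns (n + fl) i s = pvGive ns fl v j s) ∧
    (∀ k, 0 < k → ∀ i acc cs j m nm, pvWfGo ns f k i = some (j, m) →
      pvParseChildren ns f k i acc = some (cs, j) →
      ∀ (fl : Nat) (s : List (Int × Int × List Int)),
        pvMachine ns (m + fl) i (((k : Int), nm, acc) :: s) = pvResolve ns fl j ((0, nm, cs) :: s)) := by
  intro f
  induction f with
  | zero =>
    constructor
    · intro i v j n hwf; simp [pvWfGo] at hwf
    · intro k hk i acc cs j m nm hwf
      cases k with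
      | zero => omega
      | succ k => simp [pvWfGo] at hwf
  | succ f ih =>
    have hP : ∀ i v j n, pvWfGo ns (f + 1) 1 i = some (j, n) → pvParseNode ns (f + 1) i = some (v, j) →
        ∀ (fl : Nat) (s : List (Int × Int × List Int)), pvMachine ns (n + fl) i s = pvGive ns fl v j s := by
      intro i v j n hwf hparse fl s
      cases hr1 : PySem.List.pyGet? ns i with
      | none => simp [pvWfGo, hr1] at hwf
      | some nc =>
      cases hr2 : PySem.List.pyGet? ns (i + 1) with
      | none => simp [pvWfGo, hr1, hr2] at hwf
      | some nm' =>
      cases hwc : pvWfGo ns f nc.toNat (i + 2) with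
      | none => simp [pvWfGo, hr1, hr2, hwc] at hwf
      | some im =>
      obtain ⟨i2, mc⟩ := im
      cases hme : pvMetaEnd ns nm' i2 with
      | none => simp [pvWfGo, hr1, hr2, hwc, hme] at hwf
      | some e =>
      simp only [pvWfGo, hr1, hr2, hwc, hme, Option.some.injEq, Prod.mk.injEq] at hwf
      -- the (vacuous) sibling check of pvWfGo … 1 i reduces to some (e, 0)
      obtain ⟨hje, hn⟩ := hwf
      obtain ⟨vs, hpc⟩ := pvWf_parse ns f nc.toNat (i + 2) i2 mc [] hwc
      rw [List.nil_append] at hpc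
      simp only [pvParseNode, hr1, hr2, hpc] at hparse
      have hnfl : n + fl = (mc + fl) + 1 := by omega
      rw [hnfl]
      simp only [pvMachine, hr1, hr2]
      by_cases hnc : nc ≤ 0
      · have hk0 : nc.toNat = 0 := by omega
        rw [hk0] at hwc hpc
        simp only [pvWfGo, Option.some.injEq, Prod.mk.injEq] at hwc
        simp only [pvParseChildren, Option.some.injEq, Prod.mk.injEq] at hpc
        obtain ⟨hi2, hm0⟩ := hwc
        obtain ⟨hvs, hi2'⟩ := hpc
        rw [← hvs] at hparse
        have hmeta : pvMetaB ns nc [] nm'.toNat (i + 2) 0 = some (v, j) := by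
          rw [← pvMetaA_eq_pvMetaB ns nc nc [] (by simp)]
          rw [hi2]; exact hparse
        rw [← hm0, Nat.zero_add]
        exact pvResolve_close ns fl nc nm' (i + 2) v j [] s hnc hmeta
      · have hkpos : 0 < nc.toNat := by omega
        have hnck : ((nc.toNat : Nat) : Int) = nc := by omega
        rw [pvResolve.eq_2, if_neg hnc]
        have hq := ih.2 nc.toNat hkpos (i + 2) [] vs i2 mc nm' hwc hpc fl s
        rw [hnck] at hq
        rw [hq]
        have hlen := pvParseChildren_length ns f nc.toNat (i + 2) [] vs i2 hpc
        have hvs_ne : vs ≠ [] := by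
          intro hcon; rw [hcon] at hlen; simp at hlen; omega
        have hiff : nc = 0 ↔ ((0 : Int) = 0 ∧ vs = []) := by
          constructor
          · intro h0; exact absurd h0 (by omega)
          · intro hc; exact absurd hc.2 hvs_ne
        have hmeta : pvMetaB ns 0 vs nm'.toNat i2 0 = some (v, j) := by
          rw [← pvMetaA_eq_pvMetaB ns nc 0 vs hiff]
          exact hparse
        exact pvResolve_close ns fl 0 nm' i2 v j vs s (le_refl 0) hmeta
    refine ⟨hP, ?_⟩
    intro k hk i acc cs j m nm hwf hp fl s
    cases k with
    | zero => omega
    | succ k' =>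
      cases hr1 : PySem.List.pyGet? ns i with
      | none => simp [pvWfGo, hr1] at hwf
      | some nc =>
      cases hr2 : PySem.List.pyGet? ns (i + 1) with
      | none => simp [pvWfGo, hr1, hr2] at hwf
      | some nm' =>
      cases hwc : pvWfGo ns f nc.toNat (i + 2) with
      | none => simp [pvWfGo, hr1, hr2, hwc] at hwf
      | some im =>
      obtain ⟨i2, mc⟩ := im
      cases hme : pvMetaEnd ns nm' i2 with
      | none => simp [pvWfGo, hr1, hr2, hwc, hme] at hwf
      | some e =>
      cases hsib : pvWfGo ns f k' e with
      | none => simp [pvWfGo, hr1, hr2, hwc, hme, hsib] at hwf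
      | some q =>
      obtain ⟨j', ms⟩ := q
      simp only [pvWfGo, hr1, hr2, hwc, hme, hsib, Option.some.injEq, Prod.mk.injEq] at hwf
      obtain ⟨hj, hm⟩ := hwf
      -- the head node, as a 1-row of pvWfGo (its sibling part closes with some (e, 0))
      have hnodewf : pvWfGo ns (f + 1) 1 i = some (e, mc + 1) := by
        simp only [pvWfGo, hr1, hr2, hwc, hme]
      obtain ⟨v1, hv1⟩ := pvWf_parse_node ns f i e (mc + 1) hnodewf
      simp only [pvParseChildren, hv1] at hp
      have hfuel : m + fl = (mc + 1) + (ms + fl) := by omega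
      rw [hfuel]
      rw [hP i v1 e (mc + 1) hnodewf hv1 (ms + fl) (((k' + 1 : Nat), nm, acc) :: s)]
      simp only [pvGive]
      have hdec : ((k' + 1 : Nat) : Int) - 1 = ((k' : Nat) : Int) := by push_cast; ring
      rw [hdec]
      rcases Nat.eq_zero_or_pos k' with h0 | h0
      · rw [h0] at hsib hp
        simp only [pvWfGo, Option.some.injEq, Prod.mk.injEq] at hsib
        simp only [pvParseChildren, Option.some.injEq, Prod.mk.injEq] at hp
        obtain ⟨hj1, hm1⟩ := hsib
        obtain ⟨hcs, hj2⟩ := hp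
        rw [h0, ← hm1, ← hcs, ← hj2, hj1, hj]
        simp
      · have hkc : ¬ ((k' : Nat) : Int) ≤ 0 := by omega
        rw [pvResolve.eq_2, if_neg hkc]
        rw [ih.2 k' h0 e (acc ++ [v1]) cs j' ms nm hsib (by rw [← hj] at hp; exact hp) fl s, hj]

-- ===== VERDICT (by name: the statement is the Claim_ definition above) =====
theorem recursive_solver_spec : Claim_equal_recursive_solver := by
  intro ns i _ hPre
  unfold Pre_recursive_solver at hPre
  obtain ⟨⟨j, n⟩, hwf⟩ := Option.isSome_iff_exists.mp hPre
  obtain ⟨f', hf'⟩ : ∃ f', 2 * ns.length + 2 = f' + 1 := ⟨2 * ns.length + 1, by omega⟩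
  obtain ⟨v, hparse⟩ := pvWf_parse_node ns f' i j n (by rw [← hf']; exact hwf)
  rw [← hf'] at hparse
  have hb := pvWf_bounds ns (2 * ns.length + 2) 1 i j n hwf
  have hbb := hb.2 (by omega)
  have hn : n ≤ 2 * ns.length + 2 := by omega
  have hsim := (pvSim ns (2 * ns.length + 2)).1 i v j n hwf hparse (2 * ns.length + 2 - n) []
  have hfl : n + (2 * ns.length + 2 - n) = 2 * ns.length + 2 := by omega
  rw [hfl] at hsim
  unfold Spec_recursive_solver recursive_solver recursive_solver_alt
  rw [hparse, hsim]
  rfl
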